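-- pv_equiv track=rewrite | github.com/chip-student/python-lists-loops-programming-exercises | exercises/15.2-Parking_lot_check/app.py | get_parking_lot
-- ===== SOURCE A (Python) =====
-- def get_parking_lot(park_state):
--     state = {
--         "total_slots": 0,
--         "available_slots": 0,
--         "occupied_slots": 0
--       }
--
--     for i in range(0,len(park_state)):
--         for j in range(0,len(park_state)):
--             if park_state[i][j] == 2:
--                 state["available_slots"] += 1
--                 state["total_slots"] += 1
--             elif park_state[i][j] == 1:
--                 state["occupied_slots"] += 1
--                 state["total_slots"] += 1
--     return state
-- ===== SOURCE B (Python) =====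
-- def get_parking_lot(park_state):
--     n = len(park_state)
--     cells = [park_state[i][j] for i in range(n) for j in range(n)]
--     available = cells.count(2)
--     occupied = cells.count(1)
--     return {
--         "total_slots": available + occupied,
--         "available_slots": available,
--         "occupied_slots": occupied,
--     }
-- ===== Notes on version B (the rewrite author's own statement) =====
-- stated objective: idiomatic
-- what changed: Replaces A's count-while-iterating over a mutable dict with a flatten-then-count decomposition: build the flat cell list (square-indexed like A), then available/occupied are cells.count(2)/cells.count(1) and total is their sum.
import Mathlib
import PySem

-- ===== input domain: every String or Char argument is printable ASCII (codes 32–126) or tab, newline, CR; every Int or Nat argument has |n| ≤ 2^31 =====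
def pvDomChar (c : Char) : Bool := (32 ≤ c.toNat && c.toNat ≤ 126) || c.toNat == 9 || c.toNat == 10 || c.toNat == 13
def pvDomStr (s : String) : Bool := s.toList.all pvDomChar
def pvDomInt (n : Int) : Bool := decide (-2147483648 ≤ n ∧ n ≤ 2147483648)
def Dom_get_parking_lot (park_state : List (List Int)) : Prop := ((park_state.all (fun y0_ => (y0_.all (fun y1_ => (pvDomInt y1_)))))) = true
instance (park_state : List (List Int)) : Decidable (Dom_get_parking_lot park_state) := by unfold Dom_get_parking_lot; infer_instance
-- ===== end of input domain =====

-- B flattens the grid (square-indexed, like A) into one cell list and uses .count instead of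
-- counting while iterating; same three keys in the same insertion order. (objective: idiomatic)

-- ===== PORT A =====
def get_parking_lot (park_state : List (List Int)) : List (String × Int) :=
  let state : PySem.Dict String Int :=
    PySem.Dict.mk [("total_slots", 0), ("available_slots", 0), ("occupied_slots", 0)]
  let n : Int := park_state.length
  let state := (PySem.List.pyRange 0 n 1).foldl (fun st i =>
    (PySem.List.pyRange 0 n 1).foldl (fun st j =>
      let cell : Int :=
        (PySem.List.pyGet? ((PySem.List.pyGet? park_state i).getD []) j).getD 0
      if cell = 2 then
        (st.modify "available_slots" 0 (· + 1)).modify "total_slots" 0 (· + 1)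
      else if cell = 1 then
        (st.modify "occupied_slots" 0 (· + 1)).modify "total_slots" 0 (· + 1)
      else st) st) state
  state.items

-- ===== PORT B =====
def get_parking_lot_alt (park_state : List (List Int)) : List (String × Int) :=
  let n : Int := park_state.length
  let cells : List Int := (PySem.List.pyRange 0 n 1).flatMap (fun i =>
    (PySem.List.pyRange 0 n 1).map (fun j =>
      (PySem.List.pyGet? ((PySem.List.pyGet? park_state i).getD []) j).getD 0))
  let available : Int := cells.count 2
  let occupied : Int := cells.count 1
  [("total_slots", available + occupied),
   ("available_slots", available),
   ("occupied_slots", occupied)]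

-- ===== PRECONDITION & SPEC =====
-- A (and B) raise IndexError when some row is shorter than the number of rows (square indexing);
-- Pre_ excludes exactly those inputs.
def Pre_get_parking_lot (park_state : List (List Int)) : Prop :=
  ∀ row ∈ park_state, park_state.length ≤ row.length
instance (park_state : List (List Int)) : Decidable (Pre_get_parking_lot park_state) := by
  unfold Pre_get_parking_lot; infer_instance

def pvWitness_get_parking_lot : List (List Int) := [[2, 1], [0, 2]]

def Spec_get_parking_lot (park_state : List (List Int)) (out : List (String × Int)) : Prop := out = get_parking_lot_alt park_state
instance (park_state : List (List Int)) (out : List (String × Int)) : Decidable (Spec_get_parking_lot park_state out) := by unfold Spec_get_parking_lot; infer_instance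

-- ===== CLAIM (what is proved, stated in full; the proofs are below) =====
def Claim_equal_get_parking_lot : Prop := ∀ (park_state : List (List Int)), Dom_get_parking_lot park_state → Pre_get_parking_lot park_state → Spec_get_parking_lot park_state (get_parking_lot park_state)

-- ===== LEMMAS AND PROOFS =====

-- A's loop body, on the already-fetched cell value.
def pvStep (st : PySem.Dict String Int) (cell : Int) : PySem.Dict String Int :=
  if cell = 2 then
    (st.modify "available_slots" 0 (· + 1)).modify "total_slots" 0 (· + 1)
  else if cell = 1 then
    (st.modify "occupied_slots" 0 (· + 1)).modify "total_slots" 0 (· + 1)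
  else st

lemma pvStep_mk (t a o : Int) (cell : Int) :
    pvStep (PySem.Dict.mk [("total_slots", t), ("available_slots", a), ("occupied_slots", o)]) cell
      = PySem.Dict.mk [("total_slots", t + (if cell = 2 then 1 else 0) + (if cell = 1 then 1 else 0)),
                       ("available_slots", a + (if cell = 2 then 1 else 0)),
                       ("occupied_slots", o + (if cell = 1 then 1 else 0))] := by
  unfold pvStep
  split_ifs with h2 h1 <;>
    simp_all [PySem.Dict.modify, PySem.Dict.contains, PySem.Dict.insert,
      PySem.Dict.getD, PySem.Dict.get?]

lemma pvFoldl_step (cells : List Int) (t a o : Int) :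
    cells.foldl pvStep (PySem.Dict.mk [("total_slots", t), ("available_slots", a), ("occupied_slots", o)])
      = PySem.Dict.mk [("total_slots", t + cells.count 2 + cells.count 1),
                       ("available_slots", a + cells.count 2),
                       ("occupied_slots", o + cells.count 1)] := by
  induction cells generalizing t a o with
  | nil => simp
  | cons c rest ih =>
    rw [List.foldl_cons, pvStep_mk, ih]
    simp only [List.count_cons]
    split_ifs with h2 h1 <;> simp_all <;> constructor <;> ring

-- ===== VERDICT (by name: the statement is the Claim_ definition above) =====
theorem get_parking_lot_spec : Claim_equal_get_parking_lot := by
  intro ps _ _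
  unfold Spec_get_parking_lot get_parking_lot get_parking_lot_alt
  dsimp only
  rw [show (fun (st : PySem.Dict String Int) (i : Int) =>
      (PySem.List.pyRange 0 (ps.length : Int) 1).foldl (fun st j =>
        if (PySem.List.pyGet? ((PySem.List.pyGet? ps i).getD []) j).getD 0 = 2 then
          (st.modify "available_slots" 0 (· + 1)).modify "total_slots" 0 (· + 1)
        else if (PySem.List.pyGet? ((PySem.List.pyGet? ps i).getD []) j).getD 0 = 1 then
          (st.modify "occupied_slots" 0 (· + 1)).modify "total_slots" 0 (· + 1)
        else st) st)
    = (fun st i => ((PySem.List.pyRange 0 (ps.length : Int) 1).map (fun j =>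
        (PySem.List.pyGet? ((PySem.List.pyGet? ps i).getD []) j).getD 0)).foldl pvStep st) from by
      funext st i; rw [List.foldl_map]; rfl,
    show ∀ (l : List Int) (f : Int → List Int) (init : PySem.Dict String Int),
        l.foldl (fun st i => (f i).foldl pvStep st) init = (l.flatMap f).foldl pvStep init from by
      intro l f init
      induction l generalizing init with
      | nil => rfl
      | cons x xs ih => simp [List.flatMap_cons, List.foldl_append, ih],
    pvFoldl_step]
  simp
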